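-- pv_equiv track=rewrite | github.com/null-order/localbooru | src/localbooru/tags.py | _consume_leading_wrappers
-- ===== SOURCE A (Python) =====
-- from typing import Dict, Iterable, List, Optional, Sequence, Tuple
--
-- def _consume_leading_wrappers(token: str) -> Tuple[str, int, int]:
--     strong = 0
--     weak = 0
--     i = 0
--     length = len(token)
--     while i < length:
--         ch = token[i]
--         if ch == "{":
--             strong += 1
--             i += 1
--             continue
--         if ch == "[":
--             weak += 1
--             i += 1
--             continue
--         if ch.isspace():
--             i += 1
--             continue
--         break
--     return token[i:].lstrip(), strong, weak
-- ===== SOURCE B (Python) =====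
-- def _consume_leading_wrappers(token):
--     t = token.lstrip()
--     if t.startswith("{"):
--         rest, strong, weak = _consume_leading_wrappers(t[1:])
--         return rest, strong + 1, weak
--     if t.startswith("["):
--         rest, strong, weak = _consume_leading_wrappers(t[1:])
--         return rest, strong, weak + 1
--     return t, 0, 0
-- ===== Notes on version B (the rewrite author's own statement) =====
-- stated objective: alternative
-- what changed: B is recursive instead of iterative: it bulk-skips whitespace with str.lstrip(), peels one wrapper character per recursive call, and accumulates the strong/weak counts on the way back out of the recursion, where A runs a single index-advancing while loop with inline counters.
import Mathlib
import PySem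

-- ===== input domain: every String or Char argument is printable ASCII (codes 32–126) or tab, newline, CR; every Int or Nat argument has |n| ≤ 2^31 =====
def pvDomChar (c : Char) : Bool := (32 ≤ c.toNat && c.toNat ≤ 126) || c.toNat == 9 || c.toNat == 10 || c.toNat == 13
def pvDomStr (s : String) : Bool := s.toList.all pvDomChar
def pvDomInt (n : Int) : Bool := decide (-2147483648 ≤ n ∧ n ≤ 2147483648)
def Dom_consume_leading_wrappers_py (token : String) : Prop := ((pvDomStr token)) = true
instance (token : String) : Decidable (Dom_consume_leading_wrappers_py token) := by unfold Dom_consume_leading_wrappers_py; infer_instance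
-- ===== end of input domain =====

-- B replaces A's index-advancing while loop with inline counters by a recursion that bulk-skips
-- whitespace via lstrip, peels one wrapper per call and accumulates the counts on return
-- (alternative decomposition, same cost).

-- ===== PORT A =====
-- the while loop of A: advances over the suffix, updating strong/weak as it goes
def pvALoop : List Char → Int → Int → List Char × Int × Int
  | [], strong, weak => ([], strong, weak)
  | c :: rest, strong, weak =>
    if c = '{' then pvALoop rest (strong + 1) weak
    else if c = '[' then pvALoop rest strong (weak + 1)
    else if PySem.Chars.isspace c then pvALoop rest strong weak
    else (c :: rest, strong, weak)

def consume_leading_wrappers_py (token : String) : String × Int × Int :=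
  let r := pvALoop token.toList 0 0
  (String.ofList (PySem.Chars.lstrip r.1), r.2.1, r.2.2)

-- ===== PORT B =====
-- termination helper, cited by name in decreasing_by
theorem pvLstripDropLt (l t : List Char) (h : PySem.Chars.lstrip l = t) (hne : t ≠ []) :
    (t.drop 1).length < l.length := by
  have h1 : t.length ≤ l.length := by
    rw [← h]; exact List.length_dropWhile_le _ _
  have h2 : 0 < t.length := List.length_pos_iff.mpr hne
  simp; omega

-- Source B's recursion: t = token.lstrip(); peel one wrapper (t[1:] ported as List.drop 1,
-- exact for the nonnegative literal slice t[1:]) and add the count on return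
def pvBRec (l : List Char) : List Char × Int × Int :=
  let t := PySem.Chars.lstrip l
  if h1 : PySem.Chars.startswith t ['{'] then
    let r := pvBRec (t.drop 1)
    (r.1, r.2.1 + 1, r.2.2)
  else if h2 : PySem.Chars.startswith t ['['] then
    let r := pvBRec (t.drop 1)
    (r.1, r.2.1, r.2.2 + 1)
  else (t, 0, 0)
termination_by l.length
decreasing_by
  · exact pvLstripDropLt l t rfl (by
      intro hnil
      rw [hnil] at h1
      simp [PySem.Chars.startswith] at h1)
  · exact pvLstripDropLt l t rfl (by
      intro hnil
      rw [hnil] at h2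
      simp [PySem.Chars.startswith] at h2)

def consume_leading_wrappers_py_alt (token : String) : String × Int × Int :=
  let r := pvBRec token.toList
  (String.ofList r.1, r.2.1, r.2.2)

-- ===== PRECONDITION & SPEC =====
def Spec_consume_leading_wrappers_py (token : String) (out : String × Int × Int) : Prop := out = consume_leading_wrappers_py_alt token
instance (token : String) (out : String × Int × Int) : Decidable (Spec_consume_leading_wrappers_py token out) := by unfold Spec_consume_leading_wrappers_py; infer_instance

-- ===== CLAIM =====
def Claim_equal_consume_leading_wrappers_py : Prop := ∀ (token : String), Dom_consume_leading_wrappers_py token → Spec_consume_leading_wrappers_py token (consume_leading_wrappers_py token)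

-- ===== LEMMAS AND PROOFS =====
def pvWrap (c : Char) : Bool := c = '{' || c = '[' || PySem.Chars.isspace c

theorem pvALoop_eq (l : List Char) (s w : Int) :
    pvALoop l s w =
      (l.dropWhile pvWrap,
       s + ((l.takeWhile pvWrap).count '{' : Int),
       w + ((l.takeWhile pvWrap).count '[' : Int)) := by
  induction l generalizing s w with
  | nil => simp [pvALoop]
  | cons c rest ih =>
    by_cases h1 : c = '{'
    · simp [pvALoop, pvWrap, h1, List.takeWhile, List.dropWhile, ih]
      ring
    · by_cases h2 : c = '['
      · simp [pvALoop, pvWrap, h2, List.takeWhile, List.dropWhile, ih]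
        ring
      · by_cases h3 : PySem.Chars.isspace c
        · simp [pvALoop, pvWrap, h1, h2, h3, List.takeWhile, List.dropWhile, ih]
        · simp [pvALoop, pvWrap, h1, h2, h3, List.takeWhile, List.dropWhile]

-- skipping leading whitespace changes neither dropWhile pvWrap nor the wrapper counts
theorem pvLstripInvariant (l : List Char) :
    l.dropWhile pvWrap = (PySem.Chars.lstrip l).dropWhile pvWrap ∧
    (l.takeWhile pvWrap).count '{' = ((PySem.Chars.lstrip l).takeWhile pvWrap).count '{' ∧
    (l.takeWhile pvWrap).count '[' = ((PySem.Chars.lstrip l).takeWhile pvWrap).count '[' := by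
  induction l with
  | nil => simp [PySem.Chars.lstrip]
  | cons c rest ih =>
    by_cases hs : PySem.Chars.isspace c
    · have hne1 : c ≠ '{' := by intro h; rw [h] at hs; simp [PySem.Chars.isspace] at hs
      have hne2 : c ≠ '[' := by intro h; rw [h] at hs; simp [PySem.Chars.isspace] at hs
      simp [PySem.Chars.lstrip, List.dropWhile, List.takeWhile, pvWrap, hs, hne1, hne2] at ih ⊢
      exact ih
    · simp [PySem.Chars.lstrip, List.dropWhile, hs]

theorem pvLstrip_head_not_space (l : List Char) (c : Char) (rest : List Char)
    (h : PySem.Chars.lstrip l = c :: rest) : PySem.Chars.isspace c = false := by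
  unfold PySem.Chars.lstrip at h
  induction l with
  | nil => simp at h
  | cons x xs ih =>
    by_cases hx : PySem.Chars.isspace x
    · rw [List.dropWhile_cons_of_pos hx] at h; exact ih h
    · rw [List.dropWhile_cons_of_neg (by simpa using hx)] at h
      obtain ⟨h1, _⟩ := List.cons.inj h
      rw [← h1]; simpa using hx

theorem pvBRec_eq : ∀ (n : Nat) (l : List Char), l.length ≤ n →
    pvBRec l = (PySem.Chars.lstrip (l.dropWhile pvWrap),
                ((l.takeWhile pvWrap).count '{' : Int),
                ((l.takeWhile pvWrap).count '[' : Int)) := by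
  intro n
  induction n with
  | zero =>
    intro l hl
    have : l = [] := List.length_eq_zero_iff.mp (Nat.le_zero.mp hl)
    subst this
    rw [pvBRec]
    simp [PySem.Chars.lstrip, PySem.Chars.startswith]
  | succ n ih =>
    intro l hl
    obtain ⟨inv1, inv2, inv3⟩ := pvLstripInvariant l
    rw [pvBRec]
    cases ht : PySem.Chars.lstrip l with
    | nil =>
      rw [ht] at inv1 inv2 inv3
      simp [PySem.Chars.startswith, inv1, inv2, inv3, PySem.Chars.lstrip]
    | cons c rest =>
      have hlen : rest.length ≤ n := by
        have := List.length_dropWhile_le PySem.Chars.isspace l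
        rw [show l.dropWhile PySem.Chars.isspace = c :: rest from ht] at this
        simp at this; omega
      rw [ht] at inv1 inv2 inv3
      have hpref : ∀ (a : Char), (([a] : List Char).isPrefixOf (c :: rest)) = (a == c) := by
        simp [List.isPrefixOf]
      by_cases h1 : c = '{'
      · subst h1
        have hw : pvWrap '{' = true := by decide
        rw [List.dropWhile_cons_of_pos hw] at inv1
        rw [List.takeWhile_cons_of_pos hw] at inv2 inv3
        simp only [PySem.Chars.startswith, hpref]
        simp only [beq_self_eq_true, reduceDIte, List.drop_succ_cons, List.drop_zero]
        rw [ih rest hlen]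
        simp [inv1, inv2, inv3]
      · by_cases h2 : c = '['
        · subst h2
          have hw : pvWrap '[' = true := by decide
          rw [List.dropWhile_cons_of_pos hw] at inv1
          rw [List.takeWhile_cons_of_pos hw] at inv2 inv3
          simp only [PySem.Chars.startswith, hpref]
          simp only [show (('{' : Char) == '[') = false by decide, beq_self_eq_true,
            Bool.false_eq_true, reduceDIte, List.drop_succ_cons, List.drop_zero]
          rw [ih rest hlen]
          simp [inv1, inv2, inv3]
        · have hs : PySem.Chars.isspace c = false := pvLstrip_head_not_space l c rest ht
          have hw : pvWrap c = false := by simp [pvWrap, h1, h2, hs]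
          have hwn : ¬ (pvWrap c = true) := by simp [hw]
          rw [List.dropWhile_cons_of_neg hwn] at inv1
          rw [List.takeWhile_cons_of_neg hwn] at inv2 inv3
          simp only [List.count_nil] at inv2 inv3
          have e1 : PySem.Chars.lstrip (List.dropWhile pvWrap l) = c :: rest := by
            have hsn : ¬ (PySem.Chars.isspace c = true) := by simp [hs]
            rw [inv1]
            simp [PySem.Chars.lstrip, List.dropWhile_cons_of_neg hsn]
          have hb1 : (('{' : Char) == c) = false := by
            simp; intro h; exact h1 h.symm
          have hb2 : (('[' : Char) == c) = false := by
            simp; intro h; exact h2 h.symm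
          simp [PySem.Chars.startswith, hpref, hb1, hb2, e1, inv2, inv3]

-- ===== VERDICT =====
theorem consume_leading_wrappers_py_spec : Claim_equal_consume_leading_wrappers_py := by
  intro token _
  unfold Spec_consume_leading_wrappers_py
  simp [consume_leading_wrappers_py, consume_leading_wrappers_py_alt, pvALoop_eq,
    pvBRec_eq token.toList.length token.toList le_rfl]
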